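-- pv_equiv track=rewrite | github.com/Joe-Lonsdale/advent_of_code_2023 | day6/main.py | do_race
-- ===== SOURCE A (Python) =====
-- def do_race(press_time, max_time):
--     dist = 0
--     speed = 0
--     for i in range(max_time):
--         if i < press_time:
--             speed += 1
--         else:
--             dist += speed
--     return dist
-- ===== SOURCE B (Python) =====
-- def do_race(press_time, max_time):
--     if press_time <= 0 or max_time <= 0:
--         return 0
--     p = min(press_time, max_time)
--     return p * (max_time - p)
-- ===== Notes on version B (the rewrite author's own statement) =====
-- stated objective: faster
-- what changed: Replaced the O(max_time) simulation loop with the closed-form distance min(press_time, max_time) * (max_time - min(press_time, max_time)), clamped to 0 for non-positive inputs.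
import Mathlib
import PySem

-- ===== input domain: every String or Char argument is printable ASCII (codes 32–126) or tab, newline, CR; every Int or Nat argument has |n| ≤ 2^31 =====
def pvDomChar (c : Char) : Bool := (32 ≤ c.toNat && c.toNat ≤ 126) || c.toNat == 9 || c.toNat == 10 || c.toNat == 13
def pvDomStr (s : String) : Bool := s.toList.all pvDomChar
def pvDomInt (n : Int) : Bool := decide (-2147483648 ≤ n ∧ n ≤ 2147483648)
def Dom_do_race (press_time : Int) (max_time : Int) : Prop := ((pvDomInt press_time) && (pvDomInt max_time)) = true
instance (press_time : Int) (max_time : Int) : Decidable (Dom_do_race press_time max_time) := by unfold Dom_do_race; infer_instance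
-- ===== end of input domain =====

-- B replaces A's O(max_time) per-millisecond simulation with the O(1) closed-form distance formula.


-- ===== PORT A =====
-- for i in range(max_time): if i < press_time: speed += 1 else: dist += speed; return dist
def do_race (press_time : Int) (max_time : Int) : Int :=
  let s := (PySem.List.pyRange 0 max_time 1).foldl
    (fun (st : Int × Int) (i : Int) =>
      if i < press_time then (st.1, st.2 + 1) else (st.1 + st.2, st.2))
    ((0 : Int), (0 : Int))
  s.1

-- ===== PORT B =====
def do_race_alt (press_time : Int) (max_time : Int) : Int :=
  if press_time ≤ 0 ∨ max_time ≤ 0 then 0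
  else
    let p := min press_time max_time
    p * (max_time - p)

-- ===== PRECONDITION & SPEC =====
def Spec_do_race (press_time : Int) (max_time : Int) (out : Int) : Prop := out = do_race_alt press_time max_time
instance (press_time : Int) (max_time : Int) (out : Int) : Decidable (Spec_do_race press_time max_time out) := by unfold Spec_do_race; infer_instance

-- ===== CLAIM (what is proved, stated in full; the proofs are below) =====
def Claim_equal_do_race : Prop := ∀ (press_time : Int) (max_time : Int), Dom_do_race press_time max_time → Spec_do_race press_time max_time (do_race press_time max_time)

-- ===== LEMMAS AND PROOFS =====

-- loop invariant for A: after n steps, speed = max 0 (min press n) and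
-- dist = (n - speed) * max 0 press
theorem do_race_loop (press : Int) (n : Nat) :
    (PySem.List.pyRange 0 n 1).foldl
      (fun (st : Int × Int) (i : Int) =>
        if i < press then (st.1, st.2 + 1) else (st.1 + st.2, st.2))
      ((0 : Int), (0 : Int))
    = (((n : Int) - max 0 (min press n)) * max 0 press, max 0 (min press n)) := by
  induction n with
  | zero =>
    simp [PySem.List.pyRange_one_eq_nil]
  | succ n ih =>
    have h : (0 : Int) ≤ (n : Int) := Int.natCast_nonneg n
    rw [show ((n + 1 : Nat) : Int) = (n : Int) + 1 by push_cast; ring,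
        PySem.List.pyRange_one_succ_right h, List.foldl_append, ih]
    simp only [List.foldl]
    by_cases hp : (n : Int) < press
    · rw [if_pos hp]
      have h1 : max 0 (min press (n : Int)) = (n : Int) := by omega
      have h2 : max 0 (min press ((n : Int) + 1)) = (n : Int) + 1 := by omega
      rw [h1, h2]
      simp
    · rw [if_neg hp]
      push_neg at hp
      have h1 : min press (n : Int) = press := by omega
      have h2 : min press ((n : Int) + 1) = press := by omega
      rw [h1, h2]
      simp only [Prod.mk.injEq]
      exact ⟨by ring, trivial⟩

theorem do_race_eq (press max_time : Int) : do_race press max_time = do_race_alt press max_time := by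
  unfold do_race do_race_alt
  by_cases hm : max_time ≤ 0
  · rw [PySem.List.pyRange_one_eq_nil (by omega)]
    simp [hm]
  · push_neg at hm
    have hcast : max_time = ((max_time.toNat : Nat) : Int) := by omega
    rw [hcast, do_race_loop]
    by_cases hp : press ≤ 0
    · simp [hp]
    · rw [if_neg (by omega)]
      have h1 : max (0:Int) press = press := by omega
      have h2 : max 0 (min press ((max_time.toNat : Nat) : Int)) = min press ((max_time.toNat : Nat) : Int) := by omega
      rw [h1, h2]
      rcases le_total press ((max_time.toNat : Nat) : Int) with h | h
      · rw [min_eq_left h]; ring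
      · rw [min_eq_right h]; ring

-- ===== VERDICT (by name: the statement is the Claim_ definition above) =====
theorem do_race_spec : Claim_equal_do_race := by
  intro press max_time _
  exact do_race_eq press max_time
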